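-- pv_equiv track=rewrite | github.com/galonsky/adventofcode | 2018/12/day12.py | trim_and_pad_state
-- ===== SOURCE A (Python) =====
-- def trim_and_pad_state(state, first_pot_id):
--     new_state = state
--     new_pot_id = first_pot_id
--     num_leading_dots = 0
--     for c in new_state:
--         if c != '.':
--             break
--         num_leading_dots += 1
--     if num_leading_dots > 2:
--         dots_to_cut = num_leading_dots - 2
--         new_state = new_state[dots_to_cut:]
--         new_pot_id += dots_to_cut
--     elif num_leading_dots < 2:
--         dots_to_add = 2 - num_leading_dots
--         for i in range(dots_to_add):
--             new_state = '.' + new_state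
--             new_pot_id -= 1
--
--     num_trailing_dots = 0
--     for i in range(len(new_state) - 1, 0, -1):
--         if new_state[i] != '.':
--             break
--         num_trailing_dots += 1
--
--     if num_trailing_dots > 2:
--         dots_to_cut = num_trailing_dots - 2
--         new_state = new_state[0:-dots_to_cut]
--     elif num_trailing_dots < 2:
--         dots_to_add = 2 - num_trailing_dots
--         for i in range(dots_to_add):
--             new_state += '.'
--
--     return new_state, new_pot_id
-- ===== SOURCE B (Python) =====
-- def trim_and_pad_state(state, first_pot_id):
--     s = state.lstrip('.')
--     new_pot_id = first_pot_id + (len(state) - len(s)) - 2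
--     core = s.rstrip('.')
--     if not core:
--         # empty or all-dot state: A's trailing scan stops before index 0, giving three dots
--         return '...', new_pot_id
--     return '..' + core + '..', new_pot_id
-- ===== Notes on version B (the rewrite author's own statement) =====
-- stated objective: simpler
-- what changed: Replaces A's two directional index scans plus incremental cut/pad branches by a closed-form lstrip/rstrip construction '..' + core + '..' with a single pot-id formula (one explicit branch for the empty/all-dot state).
import Mathlib
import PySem

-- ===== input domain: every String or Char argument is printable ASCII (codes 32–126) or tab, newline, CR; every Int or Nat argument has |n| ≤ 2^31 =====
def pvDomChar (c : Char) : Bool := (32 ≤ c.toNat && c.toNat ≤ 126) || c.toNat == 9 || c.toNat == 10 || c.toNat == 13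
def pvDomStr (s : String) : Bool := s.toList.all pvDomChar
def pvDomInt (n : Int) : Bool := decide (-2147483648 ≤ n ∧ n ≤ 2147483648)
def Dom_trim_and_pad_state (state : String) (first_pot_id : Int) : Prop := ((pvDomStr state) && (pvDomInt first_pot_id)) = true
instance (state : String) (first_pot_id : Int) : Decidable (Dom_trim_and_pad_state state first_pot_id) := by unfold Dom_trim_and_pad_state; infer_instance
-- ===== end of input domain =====

-- B replaces A's two directional scans and incremental cut/pad branches by a closed-form
-- lstrip/rstrip construction (simpler), with one explicit branch for the empty/all-dot state.

-- ===== PORT A =====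
-- leading loop: for c in new_state: if c != '.': break; num_leading_dots += 1
def aLead : List Char → Nat
  | [] => 0
  | c :: rest => if c ≠ '.' then 0 else aLead rest + 1

-- trailing loop: for i in range(len(new_state)-1, 0, -1): if new_state[i] != '.': break; count += 1
-- (index i walks len-1, len-2, …, 1; every accessed index is in range, so getD is exact)
def aTrail (l : List Char) : Nat → Nat
  | 0 => 0
  | i + 1 => if l.getD (i + 1) ' ' ≠ '.' then 0 else aTrail l i + 1

-- leading pad loop: new_state = '.' + new_state; new_pot_id -= 1, repeated n times
def padLead : Nat → List Char × Int → List Char × Int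
  | 0, st => st
  | n + 1, (cs, p) => padLead n ('.' :: cs, p - 1)

-- trailing pad loop: new_state += '.', repeated n times
def padTrail : Nat → List Char → List Char
  | 0, cs => cs
  | n + 1, cs => padTrail n (cs ++ ['.'])

-- first half of A: leading-dot count, then cut (slice [k:], k ≥ 0: exactly List.drop) or pad
def aStage1 (cs : List Char) (p : Int) : List Char × Int :=
  let nLead := aLead cs
  if nLead > 2 then (cs.drop (nLead - 2), p + ((nLead : Int) - 2))
  else if nLead < 2 then padLead (2 - nLead) (cs, p)
  else (cs, p)

-- second half of A: trailing-dot count, then cut (slice [0:-k], 1 ≤ k ≤ len: exactly take (len-k)) or pad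
def aStage2 (cs : List Char) : List Char :=
  let nTrail := aTrail cs (cs.length - 1)
  if nTrail > 2 then cs.take (cs.length - (nTrail - 2))
  else if nTrail < 2 then padTrail (2 - nTrail) cs
  else cs

def trim_and_pad_state (state : String) (first_pot_id : Int) : String × Int :=
  let st1 := aStage1 state.toList first_pot_id
  (String.mk (aStage2 st1.1), st1.2)

-- ===== PORT B =====
-- s.lstrip('.') / s.rstrip('.') ported by hand as dropWhile resp. reverse/dropWhile/reverse (exact)
def bRstrip (cs : List Char) : List Char := (cs.reverse.dropWhile (· == '.')).reverse

def trim_and_pad_state_alt (state : String) (first_pot_id : Int) : String × Int :=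
  let cs := state.toList
  let s := cs.dropWhile (· == '.')   -- state.lstrip('.')
  let p := first_pot_id + ((cs.length : Int) - (s.length : Int)) - 2
  let core := bRstrip s              -- s.rstrip('.')
  if core = [] then ("...", p)
  else (String.mk ('.' :: '.' :: (core ++ ['.', '.'])), p)

-- ===== PRECONDITION & SPEC =====
def Spec_trim_and_pad_state (state : String) (first_pot_id : Int) (out : String × Int) : Prop :=
  out = trim_and_pad_state_alt state first_pot_id
instance (state : String) (first_pot_id : Int) (out : String × Int) : Decidable (Spec_trim_and_pad_state state first_pot_id out) := by
  unfold Spec_trim_and_pad_state; infer_instance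

-- ===== CLAIM (what is proved, stated in full; the proofs are below) =====
def Claim_equal_trim_and_pad_state : Prop := ∀ (state : String) (first_pot_id : Int), Dom_trim_and_pad_state state first_pot_id → Spec_trim_and_pad_state state first_pot_id (trim_and_pad_state state first_pot_id)

-- ===== LEMMAS AND PROOFS =====


theorem padLead_eq (n : Nat) : ∀ (cs : List Char) (p : Int),
    padLead n (cs, p) = (List.replicate n '.' ++ cs, p - n) := by
  induction n with
  | zero => intro cs p; simp [padLead]
  | succ n ih =>
    intro cs p
    rw [padLead, ih]
    rw [Prod.ext_iff]
    refine ⟨?_, ?_⟩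
    · rw [← List.singleton_append, ← List.append_assoc, ← List.replicate_succ',
        List.replicate_succ, List.cons_append]
    · push_cast; ring

theorem padTrail_eq (n : Nat) : ∀ (cs : List Char),
    padTrail n cs = cs ++ List.replicate n '.' := by
  induction n with
  | zero => intro cs; simp [padTrail]
  | succ n ih =>
    intro cs
    rw [padTrail, ih, List.append_assoc]
    simp [List.replicate_succ]

theorem aLead_eq (k : Nat) : ∀ (s : List Char), s.head? ≠ some '.' →
    aLead (List.replicate k '.' ++ s) = k := by
  induction k with
  | zero =>
    intro s hs
    cases s with
    | nil => simp [aLead]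
    | cons c t =>
      simp only [List.head?_cons, ne_eq, Option.some.injEq] at hs
      simp [aLead, hs]
  | succ k ih =>
    intro s hs
    rw [List.replicate_succ, List.cons_append, aLead]
    simp [ih s hs]

theorem aStage1_eq (k : Nat) (s : List Char) (p : Int) (hs : s.head? ≠ some '.') :
    aStage1 (List.replicate k '.' ++ s) p = ('.' :: '.' :: s, p + k - 2) := by
  unfold aStage1
  rw [aLead_eq k s hs]
  rcases k with _ | _ | _ | k
  · rw [if_neg (by norm_num), if_pos (by norm_num), padLead_eq, Prod.ext_iff]
    refine ⟨?_, ?_⟩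
    · simp [List.replicate_succ]
    · push_cast; ring
  · rw [if_neg (by norm_num), if_pos (by norm_num), padLead_eq, Prod.ext_iff]
    refine ⟨?_, ?_⟩
    · simp [List.replicate_succ]
    · push_cast; ring
  · rw [if_neg (by norm_num), if_neg (by norm_num), Prod.ext_iff]
    refine ⟨?_, ?_⟩
    · simp [List.replicate_succ]
    · push_cast; ring
  · rw [if_pos (by omega), Prod.ext_iff]
    refine ⟨?_, ?_⟩
    · have hrep : List.replicate (k + 1 + 1 + 1) '.'
          = List.replicate (k + 1) '.' ++ List.replicate 2 '.' := by
        rw [← List.replicate_add]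
      rw [hrep, List.append_assoc, show k + 1 + 1 + 1 - 2 = k + 1 from by omega,
        List.drop_left' (by simp)]
      simp [List.replicate_succ]
    · push_cast; ring

theorem aTrail_congr (l₁ l₂ : List Char) (i : Nat)
    (h : ∀ j, j ≤ i → l₁.getD j ' ' = l₂.getD j ' ') : aTrail l₁ i = aTrail l₂ i := by
  induction i with
  | zero => simp [aTrail]
  | succ i ih =>
    rw [aTrail, aTrail, h (i + 1) (le_refl _)]
    rw [ih (fun j hj => h j (by omega))]

theorem aTrail_append_dots (pre : List Char) (hpre : 1 ≤ pre.length) (m : Nat) :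
    aTrail (pre ++ List.replicate m '.') ((pre ++ List.replicate m '.').length - 1)
      = m + aTrail pre (pre.length - 1) := by
  induction m with
  | zero => simp
  | succ m ih =>
    have hY : pre ++ List.replicate (m + 1) '.'
        = (pre ++ List.replicate m '.') ++ ['.'] := by
      rw [List.replicate_succ', ← List.append_assoc]
    set X := pre ++ List.replicate m '.' with hX
    have hlenX : 1 ≤ X.length := by simp [hX]; omega
    obtain ⟨j, hj⟩ : ∃ j, X.length = j + 1 := ⟨X.length - 1, by omega⟩
    rw [hY]
    have hlen : (X ++ ['.']).length - 1 = j + 1 := by simp [hj]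
    rw [hlen, aTrail]
    have hget : (X ++ ['.']).getD (j + 1) ' ' = '.' := by
      rw [List.getD_append_right _ _ _ _ (by omega)]
      simp [hj]
    rw [hget]
    simp only [ne_eq, not_true_eq_false, if_false]
    have hcongr : aTrail (X ++ ['.']) j = aTrail X j := by
      apply aTrail_congr
      intro i hi
      exact List.getD_append _ _ _ _ (by omega)
    rw [hcongr, show j = X.length - 1 from by omega, ih]
    ring

theorem aTrail_last_nondot (q : List Char) (d : Char) (hd : ¬ d = '.') (hq : 1 ≤ q.length) :
    aTrail (q ++ [d]) ((q ++ [d]).length - 1) = 0 := by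
  obtain ⟨j, hj⟩ : ∃ j, q.length = j + 1 := ⟨q.length - 1, by omega⟩
  have hlen : (q ++ [d]).length - 1 = j + 1 := by simp [hj]
  rw [hlen, aTrail]
  have hget : (q ++ [d]).getD (j + 1) ' ' = d := by
    rw [List.getD_append_right _ _ _ _ (by omega)]
    simp [hj]
  rw [hget]
  simp [hd]

theorem aStage2_eq (u : List Char) (d : Char) (hd : ¬ d = '.') (m : Nat) :
    aStage2 (('.' :: '.' :: (u ++ [d])) ++ List.replicate m '.')
      = ('.' :: '.' :: (u ++ [d])) ++ List.replicate 2 '.' := by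
  unfold aStage2
  set pre : List Char := '.' :: '.' :: (u ++ [d]) with hpredef
  have hpre1 : 1 ≤ pre.length := by simp [hpredef]
  have htrail : aTrail (pre ++ List.replicate m '.')
      ((pre ++ List.replicate m '.').length - 1) = m := by
    rw [aTrail_append_dots pre hpre1 m]
    rw [show pre = ('.' :: '.' :: u) ++ [d] from by simp [hpredef],
      aTrail_last_nondot ('.' :: '.' :: u) d hd (by simp)]
    ring
  rw [htrail]
  rcases m with _ | _ | _ | m
  · rw [if_neg (by norm_num), if_pos (by norm_num), padTrail_eq]
    simp
  · rw [if_neg (by norm_num), if_pos (by norm_num), padTrail_eq, List.append_assoc,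
      ← List.replicate_add]
  · rw [if_neg (by norm_num), if_neg (by norm_num)]
  · rw [if_pos (by omega)]
    have hrep : List.replicate (m + 1 + 1 + 1) '.'
        = List.replicate 2 '.' ++ List.replicate (m + 1) '.' := by
      rw [← List.replicate_add]
      congr 1
      omega
    rw [hrep, ← List.append_assoc]
    have hlen : ((pre ++ List.replicate 2 '.') ++ List.replicate (m + 1) '.').length
        - (m + 1 + 1 + 1 - 2) = (pre ++ List.replicate 2 '.').length := by
      simp; omega
    rw [hlen, List.take_left' rfl]

-- the dot-prefix of a list is a replicate of dots
theorem takeWhile_dots (l : List Char) :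
    l.takeWhile (· == '.') = List.replicate (l.takeWhile (· == '.')).length '.' := by
  apply List.eq_replicate_iff.2
  refine ⟨rfl, ?_⟩
  intro b hb
  have := List.mem_takeWhile_imp hb
  simpa using this

theorem split_lead (cs : List Char) :
    cs = List.replicate (cs.takeWhile (· == '.')).length '.' ++ cs.dropWhile (· == '.') := by
  conv_lhs => rw [← List.takeWhile_append_dropWhile (p := (· == '.')) (l := cs)]
  rw [← takeWhile_dots]

theorem head?_dropWhile_ne (cs : List Char) :
    (cs.dropWhile (· == '.')).head? ≠ some '.' := by
  have h := List.head?_dropWhile_not (· == '.') cs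
  intro hc
  rw [hc] at h
  simp at h

theorem split_trail (s : List Char) :
    s = bRstrip s ++ List.replicate (s.reverse.takeWhile (· == '.')).length '.' := by
  unfold bRstrip
  conv_lhs => rw [← s.reverse_reverse,
    ← List.takeWhile_append_dropWhile (p := (· == '.')) (l := s.reverse)]
  rw [List.reverse_append]
  congr 1
  conv_lhs => rw [takeWhile_dots s.reverse]
  rw [List.reverse_replicate]

theorem bRstrip_last_ne (s : List Char) :
    (bRstrip s).getLast? ≠ some '.' := by
  have h1 : (bRstrip s).getLast? = (bRstrip s).reverse.head? := by
    rw [List.head?_reverse]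
  rw [h1]
  unfold bRstrip
  rw [List.reverse_reverse]
  exact head?_dropWhile_ne s.reverse

-- ===== VERDICT (by name: the statement is the Claim_ definition above) =====
theorem trim_and_pad_state_spec : Claim_equal_trim_and_pad_state := by
  intro state first_pot_id _hdom
  show trim_and_pad_state state first_pot_id = trim_and_pad_state_alt state first_pot_id
  unfold trim_and_pad_state trim_and_pad_state_alt
  by_cases hD : ∀ c ∈ state.toList, c = '.'
  · -- empty or all-dot state: both sides give three dots
    have hs : state.toList.dropWhile (· == '.') = [] := by
      rw [List.dropWhile_eq_nil_iff]
      intro x hx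
      simp [hD x hx]
    have hrep : state.toList = List.replicate state.toList.length '.' := by
      apply List.eq_replicate_iff.2
      refine ⟨rfl, ?_⟩
      intro b hb
      exact hD b hb
    have hA0 : aStage1 state.toList first_pot_id
        = (['.', '.'], first_pot_id + state.toList.length - 2) := by
      conv_lhs => rw [hrep, ← List.append_nil (List.replicate state.toList.length '.')]
      rw [aStage1_eq state.toList.length [] first_pot_id (by simp)]
    simp only [hA0, hs]
    rw [show bRstrip ([] : List Char) = [] from rfl, if_pos rfl, Prod.ext_iff]
    refine ⟨?_, ?_⟩
    · show String.mk (aStage2 ['.', '.']) = "..."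
      decide
    · simp only [List.length_nil]
      push_cast
      ring
  · -- some pot is occupied
    set cs := state.toList with hcs
    set k := (cs.takeWhile (· == '.')).length with hk
    set s := cs.dropWhile (· == '.') with hsdef
    have hsplit : cs = List.replicate k '.' ++ s := split_lead cs
    have hhead : s.head? ≠ some '.' := head?_dropWhile_ne cs
    have hsne : s ≠ [] := by
      intro h
      apply hD
      intro x hx
      rw [hsplit, h, List.append_nil] at hx
      exact List.eq_of_mem_replicate hx
    have hune : bRstrip s ≠ [] := by
      intro h
      have hsplit2 := split_trail s
      rw [h, List.nil_append] at hsplit2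
      rcases hm0 : (s.reverse.takeWhile (· == '.')).length with _ | m
      · rw [hm0] at hsplit2
        exact hsne (by simpa using hsplit2)
      · rw [hm0, List.replicate_succ] at hsplit2
        apply hhead
        rw [hsplit2]
        simp
    obtain ⟨v, d, hvd, hd⟩ : ∃ v d, bRstrip s = v ++ [d] ∧ ¬ d = '.' := by
      refine ⟨(bRstrip s).dropLast, (bRstrip s).getLast hune, ?_, ?_⟩
      · rw [List.dropLast_append_getLast hune]
      · have h2 := bRstrip_last_ne s
        intro h
        apply h2
        rw [List.getLast?_eq_some_getLast hune, h]
    set m := (s.reverse.takeWhile (· == '.')).length with hm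
    have hsplit2 : s = (v ++ [d]) ++ List.replicate m '.' := by
      rw [← hvd, ← split_trail s]
    have hA : aStage1 cs first_pot_id = ('.' :: '.' :: s, first_pot_id + k - 2) := by
      conv_lhs => rw [hsplit]
      exact aStage1_eq k s first_pot_id hhead
    have hcons : ('.' :: '.' :: s : List Char)
        = ('.' :: '.' :: (v ++ [d])) ++ List.replicate m '.' := by
      rw [hsplit2]; simp
    have hlen : cs.length = k + s.length := by
      rw [hsplit]; simp
    simp only [hA]
    rw [if_neg hune, Prod.ext_iff]
    refine ⟨?_, ?_⟩
    · simp only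
      rw [hcons, aStage2_eq v d hd m, hvd]
      simp [List.append_assoc]
    · simp only
      rw [hlen]
      push_cast
      ring
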